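-- pv_equiv track=rewrite | github.com/aptxj/Codewars | 6kyu_Fold_an_array.py | fold_array
-- ===== SOURCE A (Python) =====
-- def fold_array(arr, runs):
--   from math import ceil
--
--   if runs < 1 or len(arr) < 2:
--     return arr
--
--   t = len(arr) // 2
--   p = int(ceil(len(arr) / 2))
--
--   folded = arr[:p]
--
--   for i in range(t):
--     folded[i] += arr[-i-1]
--
--   return fold_array(folded, runs-1)
-- ===== SOURCE B (Python) =====
-- def fold_array(arr, runs):
--     cur = arr
--     n = runs
--     while n >= 1 and len(cur) >= 2:
--         h = len(cur) // 2
--         mid = [cur[h]] if len(cur) % 2 else []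
--         cur = [x + y for x, y in zip(cur[:h], reversed(cur))] + mid
--         n -= 1
--     return cur
-- ===== Notes on version B (the rewrite author's own statement) =====
-- stated objective: alternative
-- what changed: Replaces A's recursion-with-in-place-index-updates (copy a prefix, then mutate folded[i] += arr[-i-1] one index at a time) by an iterative while loop whose fold step is a single functional expression: zip of the first half with the reversed list plus an optional middle element.
import Mathlib
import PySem

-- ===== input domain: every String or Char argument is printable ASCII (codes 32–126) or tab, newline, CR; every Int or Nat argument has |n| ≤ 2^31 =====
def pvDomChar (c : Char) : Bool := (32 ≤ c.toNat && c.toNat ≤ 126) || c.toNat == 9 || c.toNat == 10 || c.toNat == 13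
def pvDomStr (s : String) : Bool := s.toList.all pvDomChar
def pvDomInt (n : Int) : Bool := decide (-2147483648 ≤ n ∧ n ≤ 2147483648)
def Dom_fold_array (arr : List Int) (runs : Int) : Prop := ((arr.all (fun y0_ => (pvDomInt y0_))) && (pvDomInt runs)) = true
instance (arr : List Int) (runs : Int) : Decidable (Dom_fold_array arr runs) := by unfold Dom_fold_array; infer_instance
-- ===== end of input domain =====

-- B replaces A's recursion with in-place index updates by an iterative loop whose fold
-- step is one functional expression (zip of the first half with the reversed list plus
-- an optional middle element); different decomposition, avoiding per-index writes (objective: alternative).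

-- ===== PORT A =====
-- Transliteration of A. t = len(arr)//2 and p = int(ceil(len(arr)/2)) are inlined;
-- ceil(len/2) on a float is exactly (len+1)/2 for any realizable list length.
-- arr[:p] is PySem.List.slice; folded[i] += arr[-i-1] reads/writes in-range indices,
-- ported as getD/set with PySem.List.pyGetD for the negative index.
def fold_array (arr : List Int) (runs : Int) : List Int :=
  if h : runs < 1 ∨ arr.length < 2 then arr
  else
    fold_array
      ((List.range (arr.length / 2)).foldl
        (fun f i => f.set i (f.getD i 0 + PySem.List.pyGetD arr (-(i : Int) - 1) 0))
        (PySem.List.slice arr none (some (((arr.length + 1) / 2 : Nat) : Int))))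
      (runs - 1)
termination_by runs.toNat
decreasing_by
  simp only [not_or, not_lt] at h
  omega

-- ===== PORT B =====
-- Transliteration of B's while loop (state (cur, n), n decreasing): cur[:h] → take,
-- zip → List.zipWith, reversed(cur) → List.reverse, cur[h] (in range when taken) → getD.
def fold_array_alt (arr : List Int) (runs : Int) : List Int :=
  if h : 1 ≤ runs ∧ 2 ≤ arr.length then
    fold_array_alt
      (List.zipWith (· + ·) (arr.take (arr.length / 2)) arr.reverse ++
        (if arr.length % 2 ≠ 0 then [arr.getD (arr.length / 2) 0] else []))
      (runs - 1)
  else arr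
termination_by runs.toNat
decreasing_by omega

-- ===== PRECONDITION & SPEC =====
def Spec_fold_array (arr : List Int) (runs : Int) (out : List Int) : Prop := out = fold_array_alt arr runs
instance (arr : List Int) (runs : Int) (out : List Int) : Decidable (Spec_fold_array arr runs out) := by unfold Spec_fold_array; infer_instance

-- ===== CLAIM (what is proved, stated in full; the proofs are below) =====
def Claim_equal_fold_array : Prop := ∀ (arr : List Int) (runs : Int), Dom_fold_array arr runs → Spec_fold_array arr runs (fold_array arr runs)

-- ===== LEMMAS AND PROOFS =====

-- A's write loop `for i in range(t): folded[i] += arr[-i-1]` as a map over the prefix.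
lemma foldSet_eq (g : Nat → Int) :
    ∀ (t : Nat) (l : List Int), t ≤ l.length →
      (List.range t).foldl (fun f i => f.set i (f.getD i 0 + g i)) l
        = (List.range t).map (fun i => l.getD i 0 + g i) ++ l.drop t := by
  intro t
  induction t with
  | zero => intro l _; simp
  | succ t ih =>
      intro l hl
      have ht : t < l.length := by omega
      rw [List.range_succ, List.foldl_append, ih l (by omega)]
      simp only [List.foldl_cons, List.foldl_nil, List.map_append, List.map_cons, List.map_nil]
      have hlen : ((List.range t).map (fun i => l.getD i 0 + g i)).length = t := by simp
      have hgetD :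
          ((List.range t).map (fun i => l.getD i 0 + g i) ++ l.drop t).getD t 0 = l.getD t 0 := by
        rw [List.getD_eq_getElem?_getD, List.getElem?_append_right (by omega), hlen]
        simp [List.getElem?_drop, List.getD_eq_getElem?_getD]
      rw [hgetD]
      rw [List.set_append_right _ _ (by omega), hlen, Nat.sub_self,
        List.drop_eq_getElem_cons ht, List.set_cons_zero]
      simp [List.getD_eq_getElem?_getD, List.getElem?_eq_getElem ht, List.append_assoc]

-- B's zip step as the same map.
lemma zip_eq_map (arr : List Int) (t : Nat) (ht : 2 * t ≤ arr.length) :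
    List.zipWith (· + ·) (arr.take t) arr.reverse
      = (List.range t).map (fun i => arr.getD i 0 + arr.getD (arr.length - 1 - i) 0) := by
  apply List.ext_getElem
  · simp; omega
  · intro i h1 h2
    have hi : i < t := by simpa using h2
    have hil : i < arr.length := by omega
    have hrl : arr.length - 1 - i < arr.length := by omega
    simp [List.getElem_zipWith, List.getElem_take, List.getElem_reverse,
      List.getD_eq_getElem?_getD, List.getElem?_eq_getElem hil,
      List.getElem?_eq_getElem hrl]

-- One fold step of A equals one fold step of B.
lemma step_eq (arr : List Int) (h2 : 2 ≤ arr.length) :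
    (List.range (arr.length / 2)).foldl
        (fun f i => f.set i (f.getD i 0 + PySem.List.pyGetD arr (-(i : Int) - 1) 0))
        (PySem.List.slice arr none (some (((arr.length + 1) / 2 : Nat) : Int)))
      = List.zipWith (· + ·) (arr.take (arr.length / 2)) arr.reverse ++
          (if arr.length % 2 ≠ 0 then [arr.getD (arr.length / 2) 0] else []) := by
  have hlen : (arr.take ((arr.length + 1) / 2)).length = (arr.length + 1) / 2 := by
    simp; omega
  rw [PySem.List.slice_to_natCast]
  rw [foldSet_eq _ (arr.length / 2) (arr.take ((arr.length + 1) / 2)) (by omega)]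
  congr 1
  · -- the summed prefix
    rw [zip_eq_map arr (arr.length / 2) (by omega)]
    apply List.map_congr_left
    intro i hi
    have hit : i < arr.length / 2 := List.mem_range.mp hi
    have h1 : (arr.take ((arr.length + 1) / 2)).getD i 0 = arr.getD i 0 := by
      rw [List.getD_eq_getElem?_getD, List.getD_eq_getElem?_getD,
        List.getElem?_take_of_lt (by omega)]
    have hidx : (-(i : Int) - 1) = -(((i + 1 : Nat) : Int)) := by push_cast; ring
    rw [h1, hidx, PySem.List.pyGetD_neg_natCast _ _ _ (by omega) (by omega)]
    congr 1
    rw [List.getD_eq_getElem?_getD,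
      List.getElem?_eq_getElem (show arr.length - 1 - i < arr.length by omega),
      Option.getD_some]
    exact getElem_congr rfl (by omega) (by omega)
  · -- the middle element
    rw [List.drop_take]
    rcases Nat.mod_two_eq_zero_or_one arr.length with he | ho
    · have h0 : (arr.length + 1) / 2 - arr.length / 2 = 0 := by omega
      simp [h0, he]
    · have h1 : (arr.length + 1) / 2 - arr.length / 2 = 1 := by omega
      have hm : arr.length % 2 ≠ 0 := by omega
      have htl : arr.length / 2 < arr.length := by omega
      rw [h1, if_pos hm, List.drop_eq_getElem_cons htl, List.take_succ_cons, List.take_zero,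
        List.getD_eq_getElem?_getD, List.getElem?_eq_getElem htl, Option.getD_some]

lemma main_eq : ∀ (n : Nat) (arr : List Int) (runs : Int), runs.toNat ≤ n →
    fold_array arr runs = fold_array_alt arr runs := by
  intro n
  induction n with
  | zero =>
      intro arr runs h
      have hr : runs < 1 := by omega
      rw [fold_array, fold_array_alt, dif_pos (Or.inl hr), dif_neg (by omega)]
  | succ n ih =>
      intro arr runs h
      rw [fold_array, fold_array_alt]
      by_cases hc : runs < 1 ∨ arr.length < 2
      · rw [dif_pos hc, dif_neg (by rcases hc with h' | h' <;> omega)]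
      · simp only [not_or, not_lt] at hc
        rw [dif_neg (by omega), dif_pos ⟨by omega, hc.2⟩]
        rw [step_eq arr hc.2]
        exact ih _ _ (by omega)

-- ===== VERDICT (by name: the statement is the Claim_ definition above) =====
theorem fold_array_spec : Claim_equal_fold_array := by
  intro arr runs _
  unfold Spec_fold_array
  exact main_eq runs.toNat arr runs le_rfl
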